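-- pv_equiv track=rewrite | github.com/Kha-Maker/45NSI | Sujet_39.py | pantheon
-- ===== SOURCE A (Python) =====
-- def pantheon(eleves, notes):
--     note_maxi = 0
--     meilleurs_eleves = []
--     for i in range(len(eleves)):
--         if notes[i] == note_maxi:
--             meilleurs_eleves.append(eleves[i])
--         elif notes[i] > note_maxi:
--             note_maxi = notes[i]
--             meilleurs_eleves = [eleves[i]]
--     return (note_maxi, meilleurs_eleves)
-- ===== SOURCE B (Python) =====
-- def pantheon(eleves, notes):
--     relevant = [notes[i] for i in range(len(eleves))]
--     note_maxi = max([0] + relevant)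
--     meilleurs_eleves = [eleves[i] for i in range(len(eleves)) if relevant[i] == note_maxi]
--     return (note_maxi, meilleurs_eleves)
-- ===== Notes on version B (the rewrite author's own statement) =====
-- stated objective: simpler
-- what changed: Replaces A's single running-max scan with conditional list resets by two independent passes: first compute note_maxi = max([0] + relevant notes), then a comprehension collecting the students whose note equals it.
import Mathlib
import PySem

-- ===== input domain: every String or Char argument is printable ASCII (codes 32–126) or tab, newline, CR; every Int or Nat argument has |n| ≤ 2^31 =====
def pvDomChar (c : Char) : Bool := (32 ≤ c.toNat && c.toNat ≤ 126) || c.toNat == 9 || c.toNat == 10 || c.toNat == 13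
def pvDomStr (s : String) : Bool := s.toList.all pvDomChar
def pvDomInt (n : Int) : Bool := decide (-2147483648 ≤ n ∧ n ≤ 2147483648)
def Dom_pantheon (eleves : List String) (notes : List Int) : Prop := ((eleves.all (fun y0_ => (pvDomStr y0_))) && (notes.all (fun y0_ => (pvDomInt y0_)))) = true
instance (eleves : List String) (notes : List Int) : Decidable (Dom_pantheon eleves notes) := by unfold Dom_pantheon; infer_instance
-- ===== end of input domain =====

-- B replaces A's single running-max scan (with list resets) by two independent passes:
-- max first, then a filter comprehension; same cost, plainer code.

-- ===== PORT A =====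
-- A's loop: running max (floored at 0) with the best-students list reset on a new max.
def pantheon (eleves : List String) (notes : List Int) : Int × List String :=
  (List.range eleves.length).foldl
    (fun (st : Int × List String) i =>
      let nt := (PySem.List.pyGet? notes (Int.ofNat i)).getD 0
      let el := (PySem.List.pyGet? eleves (Int.ofNat i)).getD ""
      if nt = st.1 then (st.1, st.2 ++ [el])
      else if nt > st.1 then (nt, [el])
      else st)
    (0, [])

-- ===== PORT B =====
def pantheon_alt (eleves : List String) (notes : List Int) : Int × List String :=
  let relevant := (List.range eleves.length).map
    (fun i => (PySem.List.pyGet? notes (Int.ofNat i)).getD 0)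
  let note_maxi := (PySem.List.max? (0 :: relevant) (fun y => y)).getD 0
  let meilleurs_eleves :=
    ((List.range eleves.length).filter
      (fun i => (PySem.List.pyGet? relevant (Int.ofNat i)).getD 0 = note_maxi)).map
      (fun i => (PySem.List.pyGet? eleves (Int.ofNat i)).getD "")
  (note_maxi, meilleurs_eleves)

-- ===== PRECONDITION & SPEC =====
-- Pre_: A raises IndexError (notes[i]) exactly when eleves is longer than notes.
def Pre_pantheon (eleves : List String) (notes : List Int) : Prop :=
  eleves.length ≤ notes.length
instance (eleves : List String) (notes : List Int) : Decidable (Pre_pantheon eleves notes) := by unfold Pre_pantheon; infer_instance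
def pvWitness_pantheon : List String × List Int := (["a", "b", "c"], [2, 5, 5])

def Spec_pantheon (eleves : List String) (notes : List Int) (out : Int × List String) : Prop := out = pantheon_alt eleves notes
instance (eleves : List String) (notes : List Int) (out : Int × List String) : Decidable (Spec_pantheon eleves notes out) := by unfold Spec_pantheon; infer_instance

-- ===== CLAIM (what is proved, stated in full; the proofs are below) =====
def Claim_equal_pantheon : Prop := ∀ (eleves : List String) (notes : List Int), Dom_pantheon eleves notes → Pre_pantheon eleves notes → Spec_pantheon eleves notes (pantheon eleves notes)

-- ===== LEMMAS AND PROOFS =====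

-- running max of f over range n, floored at 0
def pvM (f : Nat → Int) (n : Nat) : Int := ((List.range n).map f).foldl max 0

lemma pvM_le (f : Nat → Int) (n : Nat) : ∀ i < n, f i ≤ pvM f n := by
  induction n with
  | zero => intro i h; omega
  | succ n ih =>
    intro i h
    simp only [pvM, List.range_succ, List.map_append, List.foldl_append, List.map_cons,
      List.map_nil, List.foldl_cons, List.foldl_nil]
    rcases Nat.lt_succ_iff_lt_or_eq.mp h with h' | h'
    · exact le_trans (ih i h') (le_max_left _ _)
    · subst h'; exact le_max_right _ _

lemma pvFold_eq (f : Nat → Int) (g : Nat → String) (n : Nat) :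
    (List.range n).foldl
      (fun (st : Int × List String) i =>
        if f i = st.1 then (st.1, st.2 ++ [g i])
        else if f i > st.1 then (f i, [g i])
        else st)
      (0, []) =
    (pvM f n, ((List.range n).filter (fun i => f i = pvM f n)).map g) := by
  induction n with
  | zero => simp [pvM]
  | succ n ih =>
    have hM : pvM f (n + 1) = max (pvM f n) (f n) := by
      simp [pvM, List.range_succ]
    rw [List.range_succ, List.foldl_append, ih]
    simp only [List.foldl_cons, List.foldl_nil]
    by_cases h1 : f n = pvM f n
    · have e : pvM f (n + 1) = pvM f n := by rw [hM, h1]; simp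
      simp [h1, e, List.filter_append]
    · by_cases h2 : f n > pvM f n
      · have e : pvM f (n + 1) = f n := by rw [hM]; omega
        simp [h1, h2, e, List.filter_append, List.filter_eq_nil_iff]
        intro a ha
        have := pvM_le f n a ha
        omega
      · have e : pvM f (n + 1) = pvM f n := by rw [hM]; omega
        simp [h1, h2, e, List.filter_append]

lemma pv_max_eq (f : Nat → Int) (n : Nat) :
    (PySem.List.max? (0 :: (List.range n).map f) (fun y => y)).getD 0 = pvM f n := by
  rw [PySem.List.max?_id_cons]
  rfl

lemma pv_relevant_get (f : Nat → Int) (n i : Nat) (hi : i < n) :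
    (PySem.List.pyGet? ((List.range n).map f) (Int.ofNat i)).getD 0 = f i := by
  rw [Int.ofNat_eq_natCast, PySem.List.pyGet?_natCast]
  simp [hi]

-- ===== VERDICT (by name: the statement is the Claim_ definition above) =====
theorem pantheon_spec : Claim_equal_pantheon := by
  intro eleves notes _ _
  unfold Spec_pantheon pantheon pantheon_alt
  dsimp only
  set f := fun i => (PySem.List.pyGet? notes (Int.ofNat i)).getD 0 with hf
  set g := fun i => (PySem.List.pyGet? eleves (Int.ofNat i)).getD "" with hg
  rw [pvFold_eq f g eleves.length, pv_max_eq f eleves.length]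
  have hfilter : (List.range eleves.length).filter
      (fun i => decide ((PySem.List.pyGet? ((List.range eleves.length).map f) (Int.ofNat i)).getD 0 = pvM f eleves.length))
      = (List.range eleves.length).filter (fun i => decide (f i = pvM f eleves.length)) := by
    apply List.filter_congr
    intro i hi
    rw [pv_relevant_get f eleves.length i (List.mem_range.mp hi)]
  rw [hfilter]
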